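-- pv_equiv track=rewrite | github.com/ChrisStewart132/CS | backtracking.py | hexadecimal_numbers
-- ===== SOURCE A (Python) =====
-- def dfs_backtrack(output, is_solution, add_to_output, children, candidate=""):
--     """
--         output: container solutions are added to
--         is_solution: boolean function, true if candidate is a solution
--         add_to_output: function that adds the input candidate to the output container
--         children: function that returns child nodes/variant of the given node/candidate
--     """
--     if is_solution(candidate):
--         add_to_output(candidate, output)
--     else:
--         for child_candidate in children(candidate):
--             dfs_backtrack(output, is_solution, add_to_output, children, child_candidate)
--
-- def hexadecimal_numbers(desired_length, starting_candidate=""):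
--     def is_solution(candidate):
--         return len(candidate) == desired_length
--     def add_to_output(candidate, output):
--         output.append("0x" + candidate)
--     def children(candidate):
--         symbols = [str(x) for x in range(10)]
--         symbols += ['a','b','c','d','e','f']
--         return [candidate + str(x) for x in symbols]
--     solutions = []
--     dfs_backtrack(solutions, is_solution, add_to_output, children, starting_candidate)
--     return solutions
-- ===== SOURCE B (Python) =====
-- def hexadecimal_numbers(desired_length, starting_candidate=""):
--     level = [starting_candidate]
--     for _ in range(desired_length - len(starting_candidate)):
--         level = [c + s for c in level for s in "0123456789abcdef"]
--     return ["0x" + c for c in level]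
-- ===== Notes on version B (the rewrite author's own statement) =====
-- stated objective: idiomatic
-- what changed: Replaced the recursive DFS-backtracking with closures and an output accumulator by a flat iterative level-by-level cartesian-product build over the 16 hex symbols.
import Mathlib
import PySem

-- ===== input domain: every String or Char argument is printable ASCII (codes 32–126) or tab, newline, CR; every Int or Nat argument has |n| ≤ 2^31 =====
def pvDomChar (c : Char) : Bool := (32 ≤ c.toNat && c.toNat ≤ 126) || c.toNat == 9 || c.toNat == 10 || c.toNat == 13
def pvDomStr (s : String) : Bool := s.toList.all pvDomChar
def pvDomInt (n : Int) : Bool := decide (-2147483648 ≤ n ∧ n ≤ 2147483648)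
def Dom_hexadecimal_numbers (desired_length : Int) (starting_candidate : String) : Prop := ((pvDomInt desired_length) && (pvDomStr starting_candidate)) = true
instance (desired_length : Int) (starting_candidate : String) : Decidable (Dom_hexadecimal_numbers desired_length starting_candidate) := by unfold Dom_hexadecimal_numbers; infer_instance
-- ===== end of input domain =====

-- B replaces the DFS-backtracking recursion by an iterative level-by-level product build (idiomatic, no recursion).


-- ===== PORT A =====
-- children(candidate): symbols = [str(x) for x in range(10)] + ['a'..'f']; [candidate + s for s in symbols]
def pvChildrenA (candidate : String) : List String :=
  ((PySem.List.pyRange 0 10 1).map PySem.Int.toStr ++ ["a", "b", "c", "d", "e", "f"]).map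
    (fun s => candidate ++ s)

-- dfs_backtrack, specialised to the closures of hexadecimal_numbers; the output list is the
-- accumulator. Python's unbounded recursion is given fuel; it raises (RecursionError) exactly
-- when len(candidate) > desired_length, which Pre_ excludes, and there the fuel is sufficient.
def pvDfsA (desired : Int) : Nat → String → List String → List String
  | 0, _, out => out
  | fuel + 1, candidate, out =>
    if PySem.Str.len candidate = desired then out ++ ["0x" ++ candidate]
    else (pvChildrenA candidate).foldl (fun o c => pvDfsA desired fuel c o) out

def hexadecimal_numbers (desired_length : Int) (starting_candidate : String) : List String :=
  pvDfsA desired_length ((desired_length - PySem.Str.len starting_candidate).toNat + 1)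
    starting_candidate []

-- ===== PORT B =====
def hexadecimal_numbers_alt (desired_length : Int) (starting_candidate : String) : List String :=
  (((PySem.List.pyRange 0 (desired_length - PySem.Str.len starting_candidate) 1).foldl
      (fun level _ =>
        level.flatMap (fun c => "0123456789abcdef".toList.map (fun ch => c ++ String.ofList [ch])))
      [starting_candidate])).map (fun c => "0x" ++ c)

-- ===== PRECONDITION & SPEC =====
-- Pre_ excludes len(starting_candidate) > desired_length, where A's recursion never reaches a
-- solution and raises RecursionError (it returns no value there).
def Pre_hexadecimal_numbers (desired_length : Int) (starting_candidate : String) : Prop :=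
  PySem.Str.len starting_candidate ≤ desired_length
instance (desired_length : Int) (starting_candidate : String) : Decidable (Pre_hexadecimal_numbers desired_length starting_candidate) := by unfold Pre_hexadecimal_numbers; infer_instance
def pvWitness_hexadecimal_numbers : Int × String := (2, "a")

def Spec_hexadecimal_numbers (desired_length : Int) (starting_candidate : String) (out : List String) : Prop := out = hexadecimal_numbers_alt desired_length starting_candidate
instance (desired_length : Int) (starting_candidate : String) (out : List String) : Decidable (Spec_hexadecimal_numbers desired_length starting_candidate out) := by unfold Spec_hexadecimal_numbers; infer_instance

-- ===== CLAIM (what is proved, stated in full; the proofs are below) =====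
def Claim_equal_hexadecimal_numbers : Prop := ∀ (desired_length : Int) (starting_candidate : String), Dom_hexadecimal_numbers desired_length starting_candidate → Pre_hexadecimal_numbers desired_length starting_candidate → Spec_hexadecimal_numbers desired_length starting_candidate (hexadecimal_numbers desired_length starting_candidate)

-- ===== LEMMAS AND PROOFS =====

-- the 16 hex characters, and the lists of length-n hex strings in lexicographic order
def pvHexChars : List Char :=
  ['0', '1', '2', '3', '4', '5', '6', '7', '8', '9', 'a', 'b', 'c', 'd', 'e', 'f']

def pvCombos : Nat → List (List Char)
  | 0 => [[]]
  | n + 1 => pvHexChars.flatMap (fun h => (pvCombos n).map (fun t => h :: t))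

theorem pvOfList_pre (p t : List Char) :
    String.ofList p ++ String.ofList t = String.ofList (p ++ t) :=
  (String.ofList_append).symm

theorem pvSymbols_eq :
    ((PySem.List.pyRange 0 10 1).map PySem.Int.toStr ++ ["a", "b", "c", "d", "e", "f"])
      = ["0", "1", "2", "3", "4", "5", "6", "7", "8", "9", "a", "b", "c", "d", "e", "f"] := by
  decide

theorem pvChildrenA_eq (candidate : String) :
    pvChildrenA candidate = pvHexChars.map (fun h => candidate ++ String.ofList [h]) := by
  rw [pvChildrenA, pvSymbols_eq]
  rfl

-- A's DFS with exactly enough fuel appends, in order, one "0x"-prefixed string per combo.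
theorem pvDfsA_eq (n : Nat) :
    ∀ (cand : List Char) (out : List String),
      pvDfsA ((cand.length : Int) + n) (n + 1) (String.ofList cand) out
        = out ++ (pvCombos n).map (fun t => String.ofList ('0' :: 'x' :: (cand ++ t))) := by
  induction n with
  | zero =>
    intro cand out
    simp [pvDfsA, pvCombos, PySem.Str.len_eq]
    exact pvOfList_pre ['0', 'x'] cand
  | succ n ih =>
    intro cand out
    have hne : ¬ (PySem.Str.len (String.ofList cand) = (cand.length : Int) + (n + 1 : Nat)) := by
      simp [PySem.Str.len_eq]; omega
    have step : ∀ (h : Char) (o : List String),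
        pvDfsA ((cand.length : Int) + (n + 1 : Nat)) (n + 1) (String.ofList cand ++ String.ofList [h]) o
          = o ++ (pvCombos n).map (fun t => String.ofList ('0' :: 'x' :: (cand ++ h :: t))) := by
      intro h o
      have := ih (cand ++ [h]) o
      rw [String.ofList_append] at this
      have hlen : ((cand ++ [h]).length : Int) + n = (cand.length : Int) + (n + 1 : Nat) := by
        simp; omega
      rw [hlen] at this
      rw [this]
      simp
    rw [pvDfsA]
    rw [if_neg hne, pvChildrenA_eq]
    simp only [pvHexChars, List.map_cons, List.map_nil, List.foldl_cons, List.foldl_nil]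
    rw [step, step, step, step, step, step, step, step, step, step, step, step, step, step, step, step]
    simp [pvCombos, pvHexChars, List.append_assoc, Function.comp_def]

-- B's level loop: one product round per loop element builds the same combos, appended.
theorem pvLevel_eq (l : List Int) :
    ∀ (X : List String),
      l.foldl
        (fun level _ =>
          level.flatMap (fun c => "0123456789abcdef".toList.map (fun ch => c ++ String.ofList [ch])))
        X
      = X.flatMap (fun c => (pvCombos l.length).map (fun t => c ++ String.ofList t)) := by
  induction l with
  | nil =>
    intro X
    simp [pvCombos]
  | cons hd tl ih =>
    intro X
    rw [List.foldl_cons, ih, List.flatMap_assoc]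
    have hchars : "0123456789abcdef".toList = pvHexChars := by decide
    have hc : ∀ c : String,
        (pvHexChars.map (fun ch => c ++ String.ofList [ch])).flatMap
            (fun c' => (pvCombos tl.length).map (fun t => c' ++ String.ofList t))
          = (pvCombos (tl.length + 1)).map (fun t => c ++ String.ofList t) := by
      intro c
      simp [pvCombos, pvHexChars, Function.comp_def, String.append_assoc,
        show ∀ t, ("0" : String) ++ String.ofList t = String.ofList ('0' :: t) from fun t => pvOfList_pre ['0'] t,
        show ∀ t, ("1" : String) ++ String.ofList t = String.ofList ('1' :: t) from fun t => pvOfList_pre ['1'] t,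
        show ∀ t, ("2" : String) ++ String.ofList t = String.ofList ('2' :: t) from fun t => pvOfList_pre ['2'] t,
        show ∀ t, ("3" : String) ++ String.ofList t = String.ofList ('3' :: t) from fun t => pvOfList_pre ['3'] t,
        show ∀ t, ("4" : String) ++ String.ofList t = String.ofList ('4' :: t) from fun t => pvOfList_pre ['4'] t,
        show ∀ t, ("5" : String) ++ String.ofList t = String.ofList ('5' :: t) from fun t => pvOfList_pre ['5'] t,
        show ∀ t, ("6" : String) ++ String.ofList t = String.ofList ('6' :: t) from fun t => pvOfList_pre ['6'] t,
        show ∀ t, ("7" : String) ++ String.ofList t = String.ofList ('7' :: t) from fun t => pvOfList_pre ['7'] t,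
        show ∀ t, ("8" : String) ++ String.ofList t = String.ofList ('8' :: t) from fun t => pvOfList_pre ['8'] t,
        show ∀ t, ("9" : String) ++ String.ofList t = String.ofList ('9' :: t) from fun t => pvOfList_pre ['9'] t,
        show ∀ t, ("a" : String) ++ String.ofList t = String.ofList ('a' :: t) from fun t => pvOfList_pre ['a'] t,
        show ∀ t, ("b" : String) ++ String.ofList t = String.ofList ('b' :: t) from fun t => pvOfList_pre ['b'] t,
        show ∀ t, ("c" : String) ++ String.ofList t = String.ofList ('c' :: t) from fun t => pvOfList_pre ['c'] t,
        show ∀ t, ("d" : String) ++ String.ofList t = String.ofList ('d' :: t) from fun t => pvOfList_pre ['d'] t,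
        show ∀ t, ("e" : String) ++ String.ofList t = String.ofList ('e' :: t) from fun t => pvOfList_pre ['e'] t,
        show ∀ t, ("f" : String) ++ String.ofList t = String.ofList ('f' :: t) from fun t => pvOfList_pre ['f'] t]
    simp only [hchars, hc, List.length_cons]

-- ===== VERDICT (by name: the statement is the Claim_ definition above) =====
theorem hexadecimal_numbers_spec : Claim_equal_hexadecimal_numbers := by
  intro d s _ hpre
  unfold Pre_hexadecimal_numbers at hpre
  unfold Spec_hexadecimal_numbers hexadecimal_numbers hexadecimal_numbers_alt
  have hlen0 : PySem.Str.len s = (s.toList.length : Int) := PySem.Str.len_eq s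
  have hd : d = (s.toList.length : Int) + ((d - PySem.Str.len s).toNat : Nat) := by
    rw [hlen0] at hpre ⊢; omega
  have hA := pvDfsA_eq ((d - PySem.Str.len s).toNat) s.toList []
  rw [String.ofList_toList, ← hd, List.nil_append] at hA
  rw [hA, pvLevel_eq]
  have hlen : (PySem.List.pyRange 0 (d - PySem.Str.len s) 1).length
      = (d - PySem.Str.len s).toNat := by
    simp [PySem.List.pyRange]
    intro h
    rw [hlen0] at hpre
    have := @String.length_toList s
    omega
  rw [hlen]
  have h1 : ∀ t : List Char, s ++ String.ofList t = String.ofList (s.toList ++ t) :=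
    fun t => calc s ++ String.ofList t
        = String.ofList s.toList ++ String.ofList t := by rw [String.ofList_toList]
      _ = String.ofList (s.toList ++ t) := pvOfList_pre _ _
  simp only [List.flatMap_cons, List.flatMap_nil, List.append_nil, List.map_map,
    Function.comp_def, h1]
  exact List.map_congr_left (fun t _ => (pvOfList_pre ['0', 'x'] (s.toList ++ t)).symm)
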